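-- pv_equiv track=rewrite | github.com/HelloYug/MiniPyCodes | Libtype/libtype.py | CharNum
-- ===== SOURCE A (Python) =====
-- def CharNum(string):
--     '''
--     *** Recieves one word at a time ***\n
--     Returns the number in series of the string/word passed in integer datatype.\n
--     Argument info --> string --> The word to get number in series of.\n
--     Example;\n
--     "a" --> 1, "z" --> 26, "ac" --> 29\n
--     \tFunc("yug") --> 17453\n
--     \tFunc("Four") --> 116160
--     '''
--
--     # Defining Dictionary
--     Dictionary = {"A" : 1, "B" : 2, "C" : 3, "D" : 4, "E" : 5, "F" : 6, "G" : 7, "H" : 8, "I" : 9, "J" : 10, "K" : 11, "L" : 12, "M" : 13, "N" : 14, "O" : 15, "P" : 16, "Q" : 17, "R" : 18, "S" : 19, "T" : 20, "U" : 21, "V" : 22, "W" : 23, "X" : 24, "Y" : 25, "Z" : 26}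
--
--     l = list (string.upper())
--     s = Dictionary.get (l [0])
--
--     for i in range (1, len (l)):
--         p = s * 26
--         s = p + Dictionary.get (l[i])
--
--     return (s)
-- ===== SOURCE B (Python) =====
-- def CharNum(string):
--     values = {c: i for i, c in enumerate("ABCDEFGHIJKLMNOPQRSTUVWXYZ", 1)}
--     total = 0
--     mult = 1
--     for c in reversed(string.upper()):
--         total += values.get(c) * mult
--         mult *= 26
--     return total
-- ===== Notes on version B (the rewrite author's own statement) =====
-- stated objective: alternative
-- what changed: Replaces Horner's left-to-right multiply-add accumulator over list indices with a right-to-left positional sum that maintains a running power-of-26 multiplier, with the value table built by enumerate instead of a literal dict.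
-- outside the precondition, e.g. on CharNum('?'): A returns None, B raises TypeError
import Mathlib
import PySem

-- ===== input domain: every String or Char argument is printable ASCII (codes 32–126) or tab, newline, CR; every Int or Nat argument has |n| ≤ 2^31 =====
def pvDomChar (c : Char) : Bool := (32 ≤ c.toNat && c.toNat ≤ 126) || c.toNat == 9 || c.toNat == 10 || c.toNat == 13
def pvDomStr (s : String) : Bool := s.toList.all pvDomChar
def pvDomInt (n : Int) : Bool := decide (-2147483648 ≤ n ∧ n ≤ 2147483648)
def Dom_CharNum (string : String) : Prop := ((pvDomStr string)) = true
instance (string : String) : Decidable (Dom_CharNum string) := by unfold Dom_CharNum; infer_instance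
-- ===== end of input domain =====

-- B replaces A's Horner multiply-add loop over indices by a right-to-left positional sum
-- with a running power-of-26 multiplier (objective: alternative decomposition, same cost).

-- ===== PORT A =====
-- the literal A-Z value dictionary of A
def pvDictA : PySem.Dict Char Int := PySem.Dict.ofList
  [('A', 1), ('B', 2), ('C', 3), ('D', 4), ('E', 5), ('F', 6), ('G', 7), ('H', 8), ('I', 9),
   ('J', 10), ('K', 11), ('L', 12), ('M', 13), ('N', 14), ('O', 15), ('P', 16), ('Q', 17),
   ('R', 18), ('S', 19), ('T', 20), ('U', 21), ('V', 22), ('W', 23), ('X', 24), ('Y', 25), ('Z', 26)]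

-- Dictionary.get returning None (missing key) and l[0] on [] raise later in Python; both are
-- excluded by Pre_, so the port totalises them with defaults.
def CharNum (string : String) : Int :=
  let l := (PySem.Str.upper string).toList
  let s := pvDictA.getD (PySem.List.pyGetD l 0 ' ') 0
  (PySem.List.pyRange 1 (l.length : Int) 1).foldl
    (fun s i =>
      let p := s * 26
      p + pvDictA.getD (PySem.List.pyGetD l i ' ') 0) s

-- ===== PORT B =====
-- {c: i for i, c in enumerate("A..Z", 1)}
def pvDictB : PySem.Dict Char Int :=
  PySem.Dict.ofList ((PySem.List.enumerate "ABCDEFGHIJKLMNOPQRSTUVWXYZ".toList 1).map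
    (fun p => (p.2, p.1)))

def CharNum_alt (string : String) : Int :=
  let chars := (PySem.Str.upper string).toList
  let r := chars.reverse.foldl
    (fun (tm : Int × Int) c => (tm.1 + pvDictB.getD c 0 * tm.2, tm.2 * 26)) (0, 1)
  r.1

-- ===== PRECONDITION & SPEC =====
-- Pre_ excludes the empty string (A raises IndexError) and strings with any non-letter
-- character (A raises TypeError adding None, or returns the non-int None on a 1-char string).
def Pre_CharNum (string : String) : Prop :=
  string.toList ≠ [] ∧ string.toList.all PySem.Chars.isalpha = true
instance (string : String) : Decidable (Pre_CharNum string) := by unfold Pre_CharNum; infer_instance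

def pvWitness_CharNum : String := "yug"

def Spec_CharNum (string : String) (out : Int) : Prop := out = CharNum_alt string
instance (string : String) (out : Int) : Decidable (Spec_CharNum string out) := by unfold Spec_CharNum; infer_instance

-- ===== CLAIM (what is proved, stated in full; the proofs are below) =====
def Claim_equal_CharNum : Prop := ∀ (string : String), Dom_CharNum string → Pre_CharNum string → Spec_CharNum string (CharNum string)

-- ===== LEMMAS AND PROOFS =====

-- the two value tables agree (same 26 pairs)
lemma pvDict_eq : pvDictB = pvDictA := by decide

-- B's paired fold computes: total + mult · (base-26 value of r read low-digit-first)
lemma pvPairFold (r : List Char) : ∀ (t m : Int),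
    (r.foldl (fun (tm : Int × Int) c => (tm.1 + pvDictA.getD c 0 * tm.2, tm.2 * 26)) (t, m))
      = (t + m * r.foldr (fun c acc => pvDictA.getD c 0 + 26 * acc) 0, m * 26 ^ r.length) := by
  induction r with
  | nil => intro t m; simp
  | cons c r ih =>
      intro t m
      simp only [List.foldl_cons, List.foldr_cons, ih, List.length_cons, Prod.mk.injEq]
      exact ⟨by ring, by ring⟩

theorem CharNum_spec : Claim_equal_CharNum := by
  intro s _ hpre
  unfold Spec_CharNum CharNum CharNum_alt
  rw [pvDict_eq]
  simp only []
  set u := (PySem.Str.upper s).toList with hu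
  have hne : u ≠ [] := by
    have : u.length = s.toList.length := by
      simp [hu, PySem.Str.upper, PySem.Chars.upper]
    intro h
    exact hpre.1 (List.eq_nil_of_length_eq_zero (by simpa [h] using this.symm))
  clear_value u
  -- A side: fold over pyRange 1 |u| of pyGetD = fold over u.drop 1
  rw [show (List.foldl (fun s i => s * 26 + pvDictA.getD (PySem.List.pyGetD u i ' ') 0)
        (pvDictA.getD (PySem.List.pyGetD u 0 ' ') 0) (PySem.List.pyRange 1 (u.length : Int) 1))
      = List.foldl (fun s c => s * 26 + pvDictA.getD c 0)
        (pvDictA.getD (PySem.List.pyGetD u 0 ' ') 0) (u.drop 1) from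
    PySem.List.foldl_pyRange_pyGetD' u ' ' (fun s c => s * 26 + pvDictA.getD c 0) _ (by norm_num)]
  -- B side: unfold the paired fold
  rw [pvPairFold]
  simp only [List.foldr_reverse]
  obtain ⟨c, t, rfl⟩ := List.exists_cons_of_ne_nil hne
  have hstep : (fun (a : Int) (c : Char) => pvDictA.getD c 0 + 26 * a)
      = (fun (a : Int) (c : Char) => a * 26 + pvDictA.getD c 0) := by
    funext a c; ring
  simp [PySem.List.pyGetD_zero_cons, hstep]
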